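-- pv_equiv track=rewrite | github.com/dials/dials | src/dials/command_line/filter_blanks.py | array_to_valid_ranges
-- ===== SOURCE A (Python) =====
-- from itertools import groupby
--
-- def array_to_valid_ranges(a):
--     """Return ranges where a[j] is truthy"""
--     start = 0
--     result = []
--     for k, g in groupby(a):
--         l = list(g)
--         n = len(l)
--         if k:
--             result.append((start, start + n))
--         start += n
--     return result
-- ===== SOURCE B (Python) =====
-- def array_to_valid_ranges(a):
--     """Return ranges where a[j] is truthy"""
--     a = list(a)
--     if not a:
--         return []
--     # staged, declarative pipeline: run starts (index, value) from adjacent pairs,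
--     # then run ends, then filter by truthiness of the run's value
--     starts = [(0, a[0])] + [(i + 1, y) for i, (x, y) in enumerate(zip(a, a[1:])) if y != x]
--     ends = [i for i, _ in starts[1:]] + [len(a)]
--     return [(s, e) for (s, v), e in zip(starts, ends) if v]
-- ===== Notes on version B (the rewrite author's own statement) =====
-- stated objective: alternative
-- what changed: Replaced the stateful groupby consumer loop by a staged, declarative pipeline: run starts are computed from adjacent pairs of zip(a, a[1:]), run ends are read off the next starts plus len(a), and the result is a filtered zip of starts with ends.
import Mathlib
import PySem

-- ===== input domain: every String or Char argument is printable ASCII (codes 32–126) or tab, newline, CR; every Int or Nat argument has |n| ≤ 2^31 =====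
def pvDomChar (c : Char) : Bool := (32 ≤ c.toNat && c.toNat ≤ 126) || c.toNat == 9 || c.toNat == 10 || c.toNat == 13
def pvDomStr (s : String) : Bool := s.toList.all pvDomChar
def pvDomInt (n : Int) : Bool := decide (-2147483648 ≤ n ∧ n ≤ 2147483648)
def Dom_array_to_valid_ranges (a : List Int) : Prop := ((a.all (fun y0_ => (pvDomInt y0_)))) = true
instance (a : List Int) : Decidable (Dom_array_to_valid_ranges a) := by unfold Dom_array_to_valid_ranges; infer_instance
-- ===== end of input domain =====

-- B replaces the stateful groupby consumer loop by a staged declarative pipeline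
-- (run starts from adjacent pairs, ends from the next starts, filtered zip); objective: alternative.

-- ===== PORT A =====
-- itertools.groupby a: maximal runs of equal consecutive elements, as (key, group) pairs.
def pyGroupby (a : List Int) : List (Int × List Int) :=
  match a with
  | [] => []
  | x :: xs =>
    match pyGroupby xs with
    | [] => [(x, [x])]
    | (k, g) :: rest => if x = k then (k, x :: g) :: rest else (x, [x]) :: (k, g) :: rest

-- for k, g in groupby(a): l = list(g); n = len(l); if k: result.append((start, start+n)); start += n
def array_to_valid_ranges (a : List Int) : List (Int × Int) :=
  ((pyGroupby a).foldl
    (fun (st : Int × List (Int × Int)) kg =>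
      let n : Int := (kg.2.length : Int)
      ((st.1 + n), if kg.1 ≠ 0 then st.2 ++ [(st.1, st.1 + n)] else st.2))
    (0, [])).2

-- ===== PORT B =====
-- [(i + 1, y) for i, (x, y) in enumerate(zip(a, a[1:])) if y != x]
def chgStarts (a : List Int) : List (Int × Int) :=
  (PySem.List.enumerate (a.zip (PySem.List.slice a (some 1) none)) 0).filterMap
    (fun p => if p.2.2 ≠ p.2.1 then some (p.1 + 1, p.2.2) else none)

def array_to_valid_ranges_alt (a : List Int) : List (Int × Int) :=
  match a with
  | [] => []                                  -- if not a: return []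
  | x :: _ =>
    -- starts = [(0, a[0])] + [(i+1, y) for i,(x,y) in enumerate(zip(a, a[1:])) if y != x]
    let starts := (0, x) :: chgStarts a
    -- ends = [i for i, _ in starts[1:]] + [len(a)]
    let ends := (PySem.List.slice starts (some 1) none).map Prod.fst ++ [(a.length : Int)]
    -- [(s, e) for (s, v), e in zip(starts, ends) if v]
    (starts.zip ends).filterMap (fun p => if p.1.2 ≠ 0 then some (p.1.1, p.2) else none)

-- ===== PRECONDITION & SPEC =====
def Spec_array_to_valid_ranges (a : List Int) (out : List (Int × Int)) : Prop := out = array_to_valid_ranges_alt a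
instance (a : List Int) (out : List (Int × Int)) : Decidable (Spec_array_to_valid_ranges a out) := by unfold Spec_array_to_valid_ranges; infer_instance

-- ===== CLAIM (what is proved, stated in full; the proofs are below) =====
def Claim_equal_array_to_valid_ranges : Prop := ∀ (a : List Int), Dom_array_to_valid_ranges a → Spec_array_to_valid_ranges a (array_to_valid_ranges a)

-- ===== LEMMAS AND PROOFS =====

def stepA (st : Int × List (Int × Int)) (kg : Int × List Int) : Int × List (Int × Int) :=
  ((st.1 + (kg.2.length : Int)), if kg.1 ≠ 0 then st.2 ++ [(st.1, st.1 + (kg.2.length : Int))] else st.2)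

def shiftFst (s : Int) (p : Int × Int) : Int × Int := (p.1 + s, p.2)

def shiftPair (s : Int) (p : Int × Int) : Int × Int := (p.1 + s, p.2 + s)

def runSplit (x : Int) : List Int → ℕ × List Int
  | [] => (0, [])
  | y :: ys => if y = x then ((runSplit x ys).1 + 1, (runSplit x ys).2) else (0, y :: ys)

theorem array_A_eq_fold (a : List Int) :
    array_to_valid_ranges a = ((pyGroupby a).foldl stepA (0, [])).2 := rfl

theorem enumerate_add {α : Type} (l : List α) : ∀ (k s : Int),
    PySem.List.enumerate l (k + s) = (PySem.List.enumerate l s).map (fun p => (p.1 + k, p.2)) := by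
  induction l with
  | nil => intro k s; simp [PySem.List.enumerate_nil]
  | cons x t ih =>
    intro k s
    rw [PySem.List.enumerate_cons, PySem.List.enumerate_cons, List.map_cons]
    have h1 : k + s + 1 = k + (s + 1) := by ring
    rw [h1, ih]
    simp [add_comm]


theorem chgStarts_cons (x y : Int) (t : List Int) :
    chgStarts (x :: y :: t)
      = (if y ≠ x then [(1, y)] else []) ++ (chgStarts (y :: t)).map (shiftFst 1) := by
  unfold chgStarts
  rw [PySem.List.slice_from_one, PySem.List.slice_from_one, List.tail_cons]
  show (PySem.List.enumerate ((x,y) :: (y :: t).zip t) 0).filterMap _ = _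
  rw [PySem.List.enumerate_cons, List.filterMap_cons,
      show (0:Int) + 1 = 1 + 0 from by ring, enumerate_add, List.filterMap_map]
  have hmap : List.filterMap ((fun p : Int × (Int × Int) => if p.2.2 ≠ p.2.1 then some (p.1 + 1, p.2.2) else none) ∘ fun p : Int × (Int × Int) => (p.1 + 1, p.2)) (PySem.List.enumerate ((y :: t).zip t) 0)
      = ((PySem.List.enumerate ((y :: t).zip t) 0).filterMap (fun p => if p.2.2 ≠ p.2.1 then some (p.1 + 1, p.2.2) else none)).map (shiftFst 1) := by
    rw [List.map_filterMap]
    apply List.filterMap_congr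
    intro p _
    by_cases hp : p.2.2 ≠ p.2.1 <;> simp [hp, shiftFst, Function.comp]
  rw [hmap]
  by_cases hy : y ≠ x <;> simp [hy]


theorem chgStarts_run (c : ℕ) (p : Int) (xs : List Int)
    (h : xs = [] ∨ ∀ z zs, xs = z :: zs → z ≠ p) :
    chgStarts (List.replicate (c + 1) p ++ xs)
      = match xs with
        | [] => []
        | x0 :: _ => ((c : Int) + 1, x0) :: (chgStarts xs).map (shiftFst ((c : Int) + 1)) := by
  induction c with
  | zero =>
    rw [show List.replicate (0 + 1) p = [p] from rfl, List.singleton_append]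
    cases xs with
    | nil => rfl
    | cons x0 t =>
      have hx0 : x0 ≠ p := by
        rcases h with h | h
        · exact absurd h (by simp)
        · exact h x0 t rfl
      rw [chgStarts_cons p x0 t]
      simp [hx0]
  | succ c ih =>
    have h1 : List.replicate (c + 1 + 1) p ++ xs = p :: (List.replicate (c + 1) p ++ xs) := by
      simp [List.replicate_succ]
    have h2 : List.replicate (c + 1) p ++ xs = p :: (List.replicate c p ++ xs) := by
      simp [List.replicate_succ]
    rw [h1, h2, chgStarts_cons, ← h2, ih]
    cases xs with
    | nil => simp
    | cons x0 t =>
      have hcomp : shiftFst 1 ∘ shiftFst ((c:Int)+1) = shiftFst (((c:Int)+1)+1) :=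
        funext fun q => by simp [shiftFst]; ring
      push_cast
      simp [hcomp, shiftFst]


theorem filterMap_zip_map (K : Int) (S : List (Int × Int)) (E : List Int) :
    (((S.map (shiftFst K)).zip (E.map (· + K))).filterMap
        (fun q => if q.1.2 ≠ 0 then some (q.1.1, q.2) else none))
      = ((S.zip E).filterMap (fun q => if q.1.2 ≠ 0 then some (q.1.1, q.2) else none)).map (shiftPair K) := by
  rw [List.zip_map, List.map_filterMap, List.filterMap_map]
  apply List.filterMap_congr
  intro q _
  by_cases hq : q.1.2 ≠ 0 <;> simp [hq, shiftFst, shiftPair, Prod.map]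


theorem alt_run (c : ℕ) (p : Int) (xs : List Int)
    (h : xs = [] ∨ ∀ z zs, xs = z :: zs → z ≠ p) :
    array_to_valid_ranges_alt (List.replicate (c + 1) p ++ xs)
      = (if p ≠ 0 then [((0 : Int), ((c : Int) + 1))] else [])
        ++ (array_to_valid_ranges_alt xs).map (shiftPair ((c : Int) + 1)) := by
  have hrep : List.replicate (c + 1) p ++ xs = p :: (List.replicate c p ++ xs) := by
    simp [List.replicate_succ]
  cases xs with
  | nil =>
    have hchg : chgStarts (p :: (List.replicate c p ++ [])) = [] := by
      have := chgStarts_run c p [] (Or.inl rfl)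
      rw [hrep] at this; simpa using this
    rw [hrep]
    show ((((0,p) :: chgStarts (p :: (List.replicate c p ++ []))).zip
        ((PySem.List.slice ((0,p) :: chgStarts (p :: (List.replicate c p ++ []))) (some 1) none).map Prod.fst
          ++ [((p :: (List.replicate c p ++ [])).length : Int)])).filterMap
        (fun q => if q.1.2 ≠ 0 then some (q.1.1, q.2) else none)) = _
    rw [hchg, PySem.List.slice_from_one]
    show ([((0,p))].zip ([] ++ [((p :: (List.replicate c p ++ [])).length : Int)])).filterMap _ = _
    have hlen : ((p :: (List.replicate c p ++ ([]:List Int))).length : Int) = (c : Int) + 1 := by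
      simp
    rw [hlen]
    by_cases hp : p ≠ 0
    · simp [hp, array_to_valid_ranges_alt]
    · simp [hp, array_to_valid_ranges_alt]
  | cons x0 t =>
    have hchg : chgStarts (p :: (List.replicate c p ++ x0 :: t))
        = List.map (shiftFst ((c:Int)+1)) ((0, x0) :: chgStarts (x0 :: t)) := by
      have := chgStarts_run c p (x0 :: t) h
      rw [hrep] at this; rw [this]; simp [shiftFst]
    rw [hrep]
    show ((((0,p) :: chgStarts (p :: (List.replicate c p ++ x0 :: t))).zip
        ((PySem.List.slice ((0,p) :: chgStarts (p :: (List.replicate c p ++ x0 :: t))) (some 1) none).map Prod.fst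
          ++ [((p :: (List.replicate c p ++ x0 :: t)).length : Int)])).filterMap
        (fun q => if q.1.2 ≠ 0 then some (q.1.1, q.2) else none)) = _
    rw [hchg, PySem.List.slice_from_one, List.tail_cons]
    have hends : (List.map (shiftFst ((c:Int)+1)) ((0,x0) :: chgStarts (x0 :: t))).map Prod.fst
          ++ [((p :: (List.replicate c p ++ x0 :: t)).length : Int)]
        = (0 + ((c:Int)+1)) :: List.map (· + ((c:Int)+1))
            (((chgStarts (x0 :: t)).map Prod.fst) ++ [((x0 :: t).length : Int)]) := by
      simp [shiftFst, Function.comp]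
      ring_nf
    rw [hends, List.zip_cons_cons, List.filterMap_cons]
    have halt : array_to_valid_ranges_alt (x0 :: t)
        = (((0,x0) :: chgStarts (x0 :: t)).zip
            (((chgStarts (x0 :: t)).map Prod.fst) ++ [((x0 :: t).length : Int)])).filterMap
          (fun q => if q.1.2 ≠ 0 then some (q.1.1, q.2) else none) := by
      show ((((0,x0) :: chgStarts (x0 :: t)).zip
          ((PySem.List.slice ((0,x0) :: chgStarts (x0 :: t)) (some 1) none).map Prod.fst
            ++ [((x0 :: t).length : Int)])).filterMap
          (fun q => if q.1.2 ≠ 0 then some (q.1.1, q.2) else none)) = _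
      rw [PySem.List.slice_from_one, List.tail_cons]
    rw [halt, ← filterMap_zip_map ((c:Int)+1)]
    by_cases hp : p ≠ 0 <;> simp [hp]


theorem runSplit_decomp (x : Int) (l : List Int) :
    l = List.replicate (runSplit x l).1 x ++ (runSplit x l).2 := by
  induction l with
  | nil => rfl
  | cons y ys ih =>
    by_cases h : y = x
    · subst h; simp [runSplit, List.replicate_succ]; exact ih
    · simp [runSplit, h]


theorem runSplit_rest (x : Int) (l : List Int) :
    (runSplit x l).2 = [] ∨ ∀ z zs, (runSplit x l).2 = z :: zs → z ≠ x := by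
  induction l with
  | nil => exact Or.inl rfl
  | cons y ys ih =>
    by_cases h : y = x
    · subst h; simpa [runSplit] using ih
    · right; intro z zs hz; simp [runSplit, h] at hz; exact hz.1 ▸ h


theorem runSplit_len (x : Int) (l : List Int) :
    (runSplit x l).2.length ≤ l.length := by
  induction l with
  | nil => simp [runSplit]
  | cons y ys ih =>
    by_cases h : y = x
    · subst h; simp [runSplit]; omega
    · simp [runSplit, h]


theorem pyGroupby_head (z : Int) (zs : List Int) :
    ∃ g rest, pyGroupby (z :: zs) = (z, g) :: rest := by
  unfold pyGroupby
  cases h : pyGroupby zs with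
  | nil => exact ⟨[z], [], rfl⟩
  | cons p rest =>
    obtain ⟨k, g⟩ := p
    by_cases hk : z = k
    · subst hk; exact ⟨z :: g, rest, by simp⟩
    · exact ⟨[z], (k, g) :: rest, by simp [hk]⟩


theorem pyGroupby_replicate (c : ℕ) (p : Int) (xs : List Int)
    (h : xs = [] ∨ ∀ z zs, xs = z :: zs → z ≠ p) :
    pyGroupby (List.replicate (c + 1) p ++ xs) = (p, List.replicate (c + 1) p) :: pyGroupby xs := by
  induction c with
  | zero =>
    rw [show List.replicate (0 + 1) p = [p] from rfl, List.singleton_append]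
    cases h with
    | inl h => subst h; rfl
    | inr h =>
      cases xs with
      | nil => rfl
      | cons z zs =>
        have hzp : z ≠ p := h z zs rfl
        obtain ⟨g, rest, hg⟩ := pyGroupby_head z zs
        show (match pyGroupby (z :: zs) with
              | [] => [(p, [p])]
              | (k, g) :: rest => if p = k then (k, p :: g) :: rest else (p, [p]) :: (k, g) :: rest)
            = (p, [p]) :: pyGroupby (z :: zs)
        rw [hg]
        simp [Ne.symm hzp]
  | succ c ih =>
    have h1 : List.replicate (c + 1 + 1) p ++ xs = p :: (List.replicate (c + 1) p ++ xs) := by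
      simp [List.replicate_succ]
    rw [h1]
    show (match pyGroupby (List.replicate (c + 1) p ++ xs) with
          | [] => [(p, [p])]
          | (k, g) :: rest => if p = k then (k, p :: g) :: rest else (p, [p]) :: (k, g) :: rest)
        = (p, List.replicate (c + 1 + 1) p) :: pyGroupby xs
    rw [ih]
    simp [List.replicate_succ]


theorem main_fold (n : ℕ) : ∀ (a : List Int), a.length ≤ n → ∀ (s : Int) (acc : List (Int × Int)),
    ((pyGroupby a).foldl stepA (s, acc)).2
      = acc ++ (array_to_valid_ranges_alt a).map (shiftPair s) := by
  induction n with
  | zero =>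
    intro a ha s acc
    have : a = [] := List.length_eq_zero_iff.mp (Nat.le_zero.mp ha)
    subst this
    simp [pyGroupby, array_to_valid_ranges_alt]
  | succ n ih =>
    intro a ha s acc
    cases a with
    | nil => simp [pyGroupby, array_to_valid_ranges_alt]
    | cons x t =>
      have hdec := runSplit_decomp x t
      set c := (runSplit x t).1 with hc
      set ys := (runSplit x t).2 with hys
      have hxa : x :: t = List.replicate (c + 1) x ++ ys := by
        rw [List.replicate_succ, List.cons_append]; exact congrArg (x :: ·) hdec
      have hrest := runSplit_rest x t
      rw [hxa, pyGroupby_replicate c x ys hrest, alt_run c x ys hrest]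
      rw [List.foldl_cons]
      have hstep : stepA (s, acc) (x, List.replicate (c + 1) x)
          = (s + ((c : Int) + 1), if x ≠ 0 then acc ++ [(s, s + ((c : Int) + 1))] else acc) := by
        simp [stepA]
      rw [hstep]
      have hlen : ys.length ≤ n := by
        have h1 : ys.length ≤ t.length := runSplit_len x t
        have h2 : t.length ≤ n := by simpa using ha
        omega
      rw [ih ys hlen]
      have hcomp : shiftPair (s + ((c:Int)+1)) = shiftPair s ∘ shiftPair ((c:Int)+1) := by
        funext q; simp [shiftPair]; ring_nf; simp
      rw [hcomp, ← List.map_map]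
      by_cases hx : x ≠ 0
      · simp [hx, shiftPair]; ring_nf
      · simp [hx]

-- ===== VERDICT (by name: the statement is the Claim_ definition above) =====
theorem array_to_valid_ranges_spec : Claim_equal_array_to_valid_ranges := by
  intro a _
  show array_to_valid_ranges a = array_to_valid_ranges_alt a
  rw [array_A_eq_fold, main_fold a.length a le_rfl 0 []]
  have h0 : shiftPair 0 = id := funext fun p => by simp [shiftPair]
  rw [h0, List.map_id, List.nil_append]
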